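-- pv_equiv track=rewrite | github.com/aegatlin/stale | pygames/src/primes.py | get_odd_composites
-- ===== SOURCE A (Python) =====
-- from math import ceil, floor, gcd, sqrt
--
-- def _sieve_of_eratosthenes(n):
--     nums = [True for _ in range(n)]
--     nums[0] = False
--     nums[1] = False
--
--     for i in range(4, n, 2):
--         nums[i] = False
--
--     for i in range(3, ceil(sqrt(n)), 2):
--         if nums[i] == False:
--             continue
--
--         m = i ** 2  # e.g., 17 * 17
--         inc = i * 2  # e.g., 17 * 17 + 2 * 17 = 19 * 17
--         while m < n:
--             nums[m] = False
--             m += inc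
--
--     return nums
--
-- def get_odd_composites(excluded_max):
--     m = excluded_max
--     if m < 9:
--         return []
--     nums = _sieve_of_eratosthenes(m)
--     odd_composites = []
--     for i in range(9, len(nums), 2):  # index 9's value is 9
--         if not nums[i]:
--             odd_composites.append(i)
--     return odd_composites
-- ===== SOURCE B (Python) =====
-- from math import sqrt
--
-- def get_odd_composites(excluded_max):
--     if excluded_max < 9:
--         return []
--     return [i for i in range(9, excluded_max, 2)
--             if any(i % d == 0 for d in range(3, int(sqrt(i)) + 1, 2))]
-- ===== Notes on version B (the rewrite author's own statement) =====
-- stated objective: alternative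
-- what changed: Replaced the global Eratosthenes boolean sieve array (allocate n cells, cross off evens and odd prime multiples, then scan) with direct per-candidate trial division: each odd i in [9, excluded_max) is kept iff some odd d in [3, sqrt(i)] divides it.
import Mathlib
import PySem

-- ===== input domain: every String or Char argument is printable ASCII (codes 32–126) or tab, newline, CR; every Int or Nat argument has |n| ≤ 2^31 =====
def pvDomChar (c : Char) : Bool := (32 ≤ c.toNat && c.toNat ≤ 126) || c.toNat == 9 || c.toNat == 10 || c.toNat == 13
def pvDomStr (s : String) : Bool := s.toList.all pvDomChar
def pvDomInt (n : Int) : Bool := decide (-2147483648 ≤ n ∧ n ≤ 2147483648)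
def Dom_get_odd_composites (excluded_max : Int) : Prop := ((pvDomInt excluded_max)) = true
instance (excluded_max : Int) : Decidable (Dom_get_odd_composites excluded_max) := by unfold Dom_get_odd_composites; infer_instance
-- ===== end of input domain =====

-- B replaces A's global Eratosthenes sieve array by direct trial division of each odd
-- candidate by the odd numbers up to its square root (alternative algorithm, not faster).


-- ===== PORT A =====
-- 'while m < n: nums[m] = False; m += inc' of the sieve; the '0 < inc' conjunct only
-- makes the recursion total (every call site has inc = i*2 with i ≥ 3).
def pvMark (n inc m : Int) (nums : List Bool) : List Bool :=
  if _h : m < n ∧ 0 < inc then pvMark n inc (m + inc) (nums.set m.toNat false) else nums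
  termination_by (n - m).toNat
  decreasing_by omega

-- ceil(sqrt(n)) computed with float sqrt in Python; exact for 0 ≤ n ≤ 2^31 (float sqrt is
-- correctly rounded there), expressed exactly via the integer square root.
def pvCeilSqrt (n : Int) : Int :=
  if Nat.sqrt n.toNat * Nat.sqrt n.toNat == n.toNat then (Nat.sqrt n.toNat : Int)
  else (Nat.sqrt n.toNat : Int) + 1

-- _sieve_of_eratosthenes; only called with n ≥ 9 (for n < 2 Python would raise on nums[0]/nums[1];
-- List.set is then a no-op, but that case is unreachable from get_odd_composites).
def pvSieve (n : Int) : List Bool :=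
  let nums := List.replicate n.toNat true
  let nums := nums.set 0 false
  let nums := nums.set 1 false
  let nums := (PySem.List.pyRange 4 n 2).foldl (fun a i => a.set i.toNat false) nums
  (PySem.List.pyRange 3 (pvCeilSqrt n) 2).foldl
    (fun a i => if a.getD i.toNat true == false then a else pvMark n (i * 2) (i * i) a) nums

def get_odd_composites (excluded_max : Int) : List Int :=
  let m := excluded_max
  if m < 9 then []
  else
    let nums := pvSieve m
    (PySem.List.pyRange 9 (nums.length : Int) 2).foldl
      (fun acc i => if nums.getD i.toNat true == false then acc ++ [i] else acc) []

-- ===== PORT B =====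
-- int(sqrt(i)) in Python; exact for 0 ≤ i ≤ 2^31, expressed as the integer square root.
def pvHasOddDivisor (i : Int) : Bool :=
  (PySem.List.pyRange 3 ((Nat.sqrt i.toNat : Int) + 1) 2).any (fun d => PySem.Int.mod i d == 0)

def get_odd_composites_alt (excluded_max : Int) : List Int :=
  if excluded_max < 9 then []
  else (PySem.List.pyRange 9 excluded_max 2).filter (fun i => pvHasOddDivisor i)

-- ===== PRECONDITION & SPEC =====
def Spec_get_odd_composites (excluded_max : Int) (out : List Int) : Prop := out = get_odd_composites_alt excluded_max
instance (excluded_max : Int) (out : List Int) : Decidable (Spec_get_odd_composites excluded_max out) := by unfold Spec_get_odd_composites; infer_instance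

-- ===== CLAIM (what is proved, stated in full; the proofs are below) =====
def Claim_equal_get_odd_composites : Prop := ∀ (excluded_max : Int), Dom_get_odd_composites excluded_max → Spec_get_odd_composites excluded_max (get_odd_composites excluded_max)

-- ===== LEMMAS AND PROOFS =====

theorem pvMark_length (n inc m : Int) (a : List Bool) : (pvMark n inc m a).length = a.length := by
  fun_induction pvMark with
  | case1 m a h ih => rw [ih, List.length_set]
  | case2 => rfl

theorem getD_set_ne (l : List Bool) (k j : Nat) (d v : Bool) (h : k ≠ j) :
    (l.set k v).getD j d = l.getD j d := by
  simp [List.getD_eq_getElem?_getD, List.getElem?_set_ne h]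

theorem getD_set_false (l : List Bool) (j : Nat) (d : Bool) (h : l.getD j d = false) (k : Nat) :
    (l.set k false).getD j d = false := by
  by_cases hkj : k = j
  · subst hkj
    by_cases hk : k < l.length
    · simp [List.getD_eq_getElem?_getD, List.getElem?_set_self hk]
    · rwa [List.set_eq_of_length_le (by omega)]
  · rwa [getD_set_ne _ _ _ _ _ hkj]

theorem pvMark_getD_eq (n inc m : Int) (a : List Bool) (j : Nat) (d : Bool)
    (hm : 0 ≤ m) (hnot : ∀ t : Nat, (j : Int) ≠ m + inc * t) :
    (pvMark n inc m a).getD j d = a.getD j d := by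
  fun_induction pvMark with
  | case1 m a h ih =>
    rw [ih (by omega) (by
      intro t
      have h1 := hnot (t + 1)
      push_cast at h1
      intro hc
      exact h1 (by linear_combination hc)), getD_set_ne]
    intro hk
    have h0 := hnot 0
    omega
  | case2 => rfl

theorem pvMark_getD_false_persist (n inc m : Int) (a : List Bool) (j : Nat) (d : Bool)
    (h : a.getD j d = false) : (pvMark n inc m a).getD j d = false := by
  fun_induction pvMark with
  | case1 m a hc ih => exact ih (getD_set_false _ _ _ h _)
  | case2 => exact h

theorem pvMark_getD_false (n inc m : Int) (a : List Bool) (j : Nat) (d : Bool)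
    (hm : 0 ≤ m) (hinc : 0 < inc) (hjn : (j : Int) < n) (hj : j < a.length)
    (ht : ∃ t : Nat, (j : Int) = m + inc * t) :
    (pvMark n inc m a).getD j d = false := by
  obtain ⟨t, ht⟩ := ht
  induction t generalizing m a with
  | zero =>
    rw [pvMark]
    have hmn : m < n := by omega
    simp only [hmn, hinc, and_self]
    apply pvMark_getD_false_persist
    have : m.toNat = j := by omega
    subst this
    simp [List.getD_eq_getElem?_getD, List.getElem?_set_self hj]
  | succ t ih =>
    rw [pvMark]
    have hmn : m < n := by
      have : (0:Int) ≤ inc * (t+1) := by positivity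
      push_cast at ht; omega
    simp only [hmn, hinc, and_self]
    refine ih (m + inc) _ (by omega) (by simpa using hj) ?_
    push_cast at ht ⊢; linarith

theorem foldl_set_length (xs : List Int) (a : List Bool) :
    (xs.foldl (fun a i => a.set i.toNat false) a).length = a.length := by
  induction xs generalizing a with
  | nil => rfl
  | cons x xs ih => simp [List.foldl_cons, ih]

theorem foldl_set_getD_eq (xs : List Int) (a : List Bool) (j : Nat) (d : Bool)
    (h : ∀ x ∈ xs, x.toNat ≠ j) :
    (xs.foldl (fun a i => a.set i.toNat false) a).getD j d = a.getD j d := by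
  induction xs generalizing a with
  | nil => rfl
  | cons x xs ih =>
    rw [List.foldl_cons, ih _ (fun x hx => h x (by simp [hx])),
      getD_set_ne _ _ _ _ _ (h x (by simp))]

-- named pieces of pvSieve (definitional: pvSieve_eq below is rfl)
def pvInitState (n : Int) : List Bool :=
  (PySem.List.pyRange 4 n 2).foldl (fun a i => a.set i.toNat false)
    (((List.replicate n.toNat true).set 0 false).set 1 false)

def sieveStep (n : Int) : List Bool → Int → List Bool :=
  fun a i => if a.getD i.toNat true == false then a else pvMark n (i * 2) (i * i) a

theorem pvSieve_eq (n : Int) :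
    pvSieve n = (PySem.List.pyRange 3 (pvCeilSqrt n) 2).foldl (sieveStep n) (pvInitState n) := rfl

theorem sieveStep_length (n i : Int) (a : List Bool) : (sieveStep n a i).length = a.length := by
  unfold sieveStep
  split
  · rfl
  · exact pvMark_length _ _ _ _

theorem init_getD_true (n : Int) (h9 : 9 ≤ n) (q : Nat) (hq : (q : Int) < n)
    (hodd : q = 2 ∨ (q % 2 = 1 ∧ 3 ≤ q)) : (pvInitState n).getD q true = true := by
  unfold pvInitState
  rw [foldl_set_getD_eq]
  · rw [getD_set_ne _ _ _ _ _ (by omega), getD_set_ne _ _ _ _ _ (by omega)]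
    have hq' : q < n.toNat := by omega
    simp [List.getD_eq_getElem?_getD, hq']
  · intro x hx
    rw [PySem.List.mem_pyRange_iff_of_pos (by omega)] at hx
    omega

-- invariant: length is n and primes below n are still marked True
def sieveGood (n : Int) (a : List Bool) : Prop :=
  a.length = n.toNat ∧ ∀ r : Nat, r < n.toNat → Nat.Prime r → a.getD r true = true

theorem sieveGood_init (n : Int) (h9 : 9 ≤ n) : sieveGood n (pvInitState n) := by
  refine ⟨by unfold pvInitState; simp only [foldl_set_length, List.length_set, List.length_replicate], ?_⟩
  intro r hr hrp
  apply init_getD_true n h9 r (by omega)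
  have h2 := hrp.two_le
  rcases Nat.even_or_odd r with he | ho
  · exact Or.inl (hrp.even_iff.mp he)
  · have := Nat.odd_iff.mp ho
    exact Or.inr ⟨this, by omega⟩

theorem sieveGood_step (n : Int) (i : Int) (hi3 : 3 ≤ i) (a : List Bool)
    (ha : sieveGood n a) : sieveGood n (sieveStep n a i) := by
  refine ⟨(sieveStep_length n i a).trans ha.1, ?_⟩
  intro q hqL hq
  unfold sieveStep
  split
  · exact ha.2 q hqL hq
  · rw [pvMark_getD_eq _ _ _ _ _ _ (mul_self_nonneg i) ?_]
    · exact ha.2 q hqL hq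
    · intro t heq
      have hc : (q : Int) = i * (i + 2 * t) := by linear_combination heq
      have hq2 := hq.two_le
      have hmul : q = i.toNat * (i + 2 * t).toNat := by
        have h1 : ((i.toNat * (i + 2 * t).toNat : Nat) : Int) = (q : Int) := by
          push_cast
          rw [Int.toNat_of_nonneg (by omega), Int.toNat_of_nonneg (by omega)]
          linarith [hc]
        exact_mod_cast h1.symm
      have h3a : 3 ≤ i.toNat := by omega
      have h3c : 3 ≤ (i + 2 * t).toNat := by
        have : (3:Int) ≤ i + 2 * t := by omega
        omega
      rcases hq.eq_one_or_self_of_dvd i.toNat ⟨(i + 2 * t).toNat, hmul⟩ with h | h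
      · omega
      · nlinarith [hmul, hq.two_le]

theorem sieveGood_foldl (n : Int) (l : List Int) (hl : ∀ x ∈ l, 3 ≤ x)
    (a : List Bool) (ha : sieveGood n a) : sieveGood n (l.foldl (sieveStep n) a) :=
  List.foldlRecOn l (sieveStep n) ha (fun b hb x hx => sieveGood_step n x (hl x hx) b hb)

theorem sieve_primes_true (n : Int) (h9 : 9 ≤ n) (q : Nat) (hq : q < n.toNat)
    (hqp : Nat.Prime q) : (pvSieve n).getD q true = true := by
  rw [pvSieve_eq]
  refine (sieveGood_foldl n _ ?_ _ (sieveGood_init n h9)).2 q hq hqp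
  intro x hx
  exact ((PySem.List.mem_pyRange_iff_of_pos (by norm_num) x).mp hx).1

theorem sieve_composite_false (n : Int) (h9 : 9 ≤ n) (j : Nat) (hjn : (j : Int) < n)
    (hodd : j % 2 = 1) (hj9 : 9 ≤ j) (hcomp : ¬ Nat.Prime j) :
    (pvSieve n).getD j true = false := by
  have hp : Nat.Prime j.minFac := Nat.minFac_prime (by omega)
  obtain ⟨k, hk⟩ := Nat.minFac_dvd j
  set p := j.minFac with hp_def
  have hsq : p * p ≤ j := by
    have h := Nat.minFac_sq_le_self (n := j) (by omega) hcomp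
    rwa [pow_two] at h
  have hp2 := hp.two_le
  have hpo : p % 2 = 1 := by
    rcases Nat.even_or_odd p with he | ho
    · exfalso
      have h2 : p = 2 := hp.even_iff.mp he
      have : 2 ∣ j := h2 ▸ (hp_def ▸ Nat.minFac_dvd j)
      omega
    · exact Nat.odd_iff.mp ho
  have hpj : p < j := by nlinarith
  have hk_odd : k % 2 = 1 := by
    rcases Nat.even_or_odd k with ⟨c, hc⟩ | ho
    · exfalso
      have : j = p * c + p * c := by rw [hk, hc]; ring
      omega
    · exact Nat.odd_iff.mp ho
  have hkp : p ≤ k := by nlinarith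
  have hpb : (p : Int) < pvCeilSqrt n := by
    unfold pvCeilSqrt
    split
    · next hsq_eq =>
      have hLs : Nat.sqrt n.toNat * Nat.sqrt n.toNat = n.toNat := by
        simpa using hsq_eq
      have hlt : p * p < n.toNat := by omega
      have hps : p < Nat.sqrt n.toNat := Nat.mul_self_lt_mul_self_iff.mp
        (show p * p < Nat.sqrt n.toNat * Nat.sqrt n.toNat by rw [hLs]; exact hlt)
      exact_mod_cast hps
    · have hle : p ≤ Nat.sqrt n.toNat := Nat.le_sqrt.mpr (by omega)
      have : ((p : Nat) : Int) ≤ (Nat.sqrt n.toNat : Int) := by exact_mod_cast hle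
      omega
  have hmem : (p : Int) ∈ PySem.List.pyRange 3 (pvCeilSqrt n) 2 :=
    (PySem.List.mem_pyRange_iff_of_pos (by norm_num) _).mpr
      ⟨by exact_mod_cast (show 3 ≤ p by omega), hpb, by omega⟩
  obtain ⟨l₁, l₂, hsplit⟩ := List.append_of_mem hmem
  rw [pvSieve_eq, hsplit, List.foldl_append, List.foldl_cons]
  have hA1 : sieveGood n (l₁.foldl (sieveStep n) (pvInitState n)) := by
    refine sieveGood_foldl n l₁ ?_ _ (sieveGood_init n h9)
    intro x hx
    have : x ∈ PySem.List.pyRange 3 (pvCeilSqrt n) 2 := by rw [hsplit]; simp [hx]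
    exact ((PySem.List.mem_pyRange_iff_of_pos (by norm_num) x).mp this).1
  set A1 := l₁.foldl (sieveStep n) (pvInitState n) with hA1_def
  have hstep : sieveStep n A1 (p : Int) = pvMark n ((p : Int) * 2) ((p : Int) * (p : Int)) A1 := by
    unfold sieveStep
    rw [Int.toNat_natCast, hA1.2 p (by omega) hp]
    simp
  rw [hstep]
  refine List.foldlRecOn l₂ (sieveStep n)
    (motive := fun (a : List Bool) => a.getD j true = false) ?_ ?_
  · refine pvMark_getD_false n ((p : Int) * 2) ((p : Int) * (p : Int)) A1 j true (mul_self_nonneg _)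
      (by exact_mod_cast (show (0:Nat) < p * 2 by omega)) hjn (by rw [hA1.1]; omega)
      ⟨(k - p) / 2, ?_⟩
    have hk2 : k = p + 2 * ((k - p) / 2) := by omega
    have hj' : j = p * p + p * 2 * ((k - p) / 2) := by
      rw [hk]
      conv_lhs => rw [hk2]
      ring
    exact_mod_cast congrArg (Nat.cast (R := Int)) hj'
  · intro a ha x hx
    unfold sieveStep
    split
    · exact ha
    · exact pvMark_getD_false_persist _ _ _ _ _ _ ha

theorem pvSieve_length (n : Int) : (pvSieve n).length = n.toNat := by
  rw [pvSieve_eq]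
  refine List.foldlRecOn (motive := fun (a : List Bool) => a.length = n.toNat) _ _ ?_ ?_
  · unfold pvInitState
    simp only [foldl_set_length, List.length_set, List.length_replicate]
  · intro a ha i hi
    rw [sieveStep_length, ha]

theorem hasOddDivisor_iff (i : Int) (h9 : 9 ≤ i) (hodd : i.toNat % 2 = 1) :
    (pvHasOddDivisor i = true) ↔ ¬ Nat.Prime i.toNat := by
  unfold pvHasOddDivisor
  rw [List.any_eq_true]
  constructor
  · rintro ⟨d, hd, hdvd⟩
    rw [PySem.List.mem_pyRange_iff_of_pos (by norm_num)] at hd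
    obtain ⟨hd3, hdlt, -⟩ := hd
    have hdvd' : d ∣ i := (PySem.Int.mod_eq_zero_iff_dvd i d).mp (by simpa using hdvd)
    have hdN : d.toNat ∣ i.toNat := by
      have h1 : (d.toNat : Int) ∣ (i.toNat : Int) := by
        rw [Int.toNat_of_nonneg (by omega), Int.toNat_of_nonneg (by omega)]
        exact hdvd'
      exact_mod_cast h1
    have h3 : 3 ≤ d.toNat := by omega
    have hle : d.toNat ≤ Nat.sqrt i.toNat := by omega
    have hsq : d.toNat * d.toNat ≤ i.toNat := Nat.le_sqrt.mp hle
    intro hP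
    rcases hP.eq_one_or_self_of_dvd d.toNat hdN with h | h
    · omega
    · have h9N : 9 ≤ i.toNat := by omega
      nlinarith
  · intro hcomp
    have h9N : 9 ≤ i.toNat := by omega
    have hp : Nat.Prime i.toNat.minFac := Nat.minFac_prime (by omega)
    have hpd := Nat.minFac_dvd i.toNat
    set p := i.toNat.minFac with hpdef
    have hsq : p * p ≤ i.toNat := by
      have h := Nat.minFac_sq_le_self (n := i.toNat) (by omega) hcomp
      rwa [pow_two] at h
    have hp2 := hp.two_le
    have hpo : p % 2 = 1 := by
      rcases Nat.even_or_odd p with he | ho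
      · exfalso
        have h2 : p = 2 := hp.even_iff.mp he
        have : 2 ∣ i.toNat := h2 ▸ hpd
        omega
      · exact Nat.odd_iff.mp ho
    refine ⟨(p : Int), ?_, ?_⟩
    · rw [PySem.List.mem_pyRange_iff_of_pos (by norm_num)]
      refine ⟨by exact_mod_cast (show 3 ≤ p by omega), ?_, by omega⟩
      have hs : p ≤ Nat.sqrt i.toNat := Nat.le_sqrt.mpr hsq
      have : ((p : Nat) : Int) ≤ (Nat.sqrt i.toNat : Int) := by exact_mod_cast hs
      omega
    · have hdvd : (p : Int) ∣ i := by
        obtain ⟨c, hc⟩ := hpd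
        refine ⟨(c : Int), ?_⟩
        rw [← Int.toNat_of_nonneg (show (0:Int) ≤ i by omega), hc]
        push_cast
        ring
      simpa using (PySem.Int.mod_eq_zero_iff_dvd i (p : Int)).mpr hdvd

theorem ports_agree : ∀ (excluded_max : Int),
    get_odd_composites excluded_max = get_odd_composites_alt excluded_max := by
  intro m
  unfold get_odd_composites get_odd_composites_alt
  by_cases hm : m < 9
  · simp [hm]
  · simp only [hm, if_false]
    rw [pvSieve_length, Int.toNat_of_nonneg (by omega),
      PySem.List.foldl_append_if_eq_filter, List.nil_append]
    apply List.filter_congr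
    intro i hi
    rw [PySem.List.mem_pyRange_iff_of_pos (by norm_num)] at hi
    obtain ⟨h9i, him, hdvd⟩ := hi
    have hoddN : i.toNat % 2 = 1 := by omega
    have h9N : 9 ≤ i.toNat := by omega
    have hA : (((pvSieve m).getD i.toNat true == false) = true) ↔ ¬ Nat.Prime i.toNat := by
      rw [beq_iff_eq]
      constructor
      · intro hf hP
        rw [sieve_primes_true m (by omega) i.toNat (by omega) hP] at hf
        simp at hf
      · exact sieve_composite_false m (by omega) i.toNat (by omega) hoddN h9N
    have hB := hasOddDivisor_iff i (by omega) hoddN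
    have hiff := hA.trans hB.symm
    exact Bool.coe_iff_coe.mp hiff

-- ===== VERDICT (by name: the statement is the Claim_ definition above) =====
theorem get_odd_composites_spec : Claim_equal_get_odd_composites := by
  intro m _
  unfold Spec_get_odd_composites
  exact ports_agree m
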